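-- pv_equiv track=rewrite | github.com/mihirphatak/api_repo | UtilityApp/views.py | get_required_data
-- ===== SOURCE A (Python) =====
-- def get_required_data(required_fields, data):
--     received_data = {}
--     for element in required_fields:
--         value = data.get(element, None)
--         if value is None:
--             raise DataValidationError(element, element + ' is required')
--         received_data[element] = value
--     return received_data
--
-- class DataValidationError(Exception):
--     pass
-- ===== SOURCE B (Python) =====
-- class DataValidationError(Exception):
--     pass
--
-- def get_required_data(required_fields, data):
--     missing = next((f for f in required_fields if data.get(f) is None), None)
--     if missing is not None:
--         raise DataValidationError(missing, missing + ' is required')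
--     return {f: data[f] for f in required_fields}
-- ===== Notes on version B (the rewrite author's own statement) =====
-- stated objective: simpler
-- what changed: Replaces the single validate-and-accumulate loop with two phases: one scan that finds the first missing field and raises, then a dict comprehension that builds the result, relying on the completed check.
import Mathlib
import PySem

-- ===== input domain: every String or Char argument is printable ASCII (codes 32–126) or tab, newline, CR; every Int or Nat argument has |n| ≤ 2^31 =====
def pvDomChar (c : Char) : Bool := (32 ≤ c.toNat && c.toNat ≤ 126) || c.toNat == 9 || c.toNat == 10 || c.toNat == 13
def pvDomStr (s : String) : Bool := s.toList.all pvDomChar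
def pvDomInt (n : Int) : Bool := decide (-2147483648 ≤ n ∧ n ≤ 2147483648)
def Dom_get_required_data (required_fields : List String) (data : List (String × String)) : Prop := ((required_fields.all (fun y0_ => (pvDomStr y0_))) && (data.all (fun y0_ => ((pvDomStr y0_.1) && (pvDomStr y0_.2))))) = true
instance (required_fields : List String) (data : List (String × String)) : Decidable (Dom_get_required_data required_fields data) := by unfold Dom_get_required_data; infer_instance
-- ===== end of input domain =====

-- B replaces A's single validate-and-accumulate loop by two phases (find the first
-- missing field, then build the result dict); simpler decomposition, same cost.

-- ===== PORT A =====
-- data.get(element, None): dict lookup = first match in the association list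
def pyDictGet (data : List (String × String)) (k : String) : Option String :=
  (data.find? (fun p => p.1 == k)).map Prod.snd

-- the loop body: state = some received_data, or none once the raise has fired
def getReqStep (data : List (String × String))
    (acc : Option (PySem.Dict String String)) (element : String) :
    Option (PySem.Dict String String) :=
  match acc with
  | none => none
  | some received =>
    match pyDictGet data element with
    | none => none
    | some v => some (received.insert element v)

def get_required_data (required_fields : List String) (data : List (String × String)) : List (String × String) :=
  match required_fields.foldl (getReqStep data) (some PySem.Dict.empty) with
  | none => []      -- DataValidationError raised (excluded by Pre_)
  | some received => received.items

-- ===== PORT B =====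
def get_required_data_alt (required_fields : List String) (data : List (String × String)) : List (String × String) :=
  match required_fields.find? (fun f => (pyDictGet data f).isNone) with
  | some _ => []    -- DataValidationError raised (excluded by Pre_)
  | none =>
    (required_fields.foldl
      (fun d f => d.insert f ((pyDictGet data f).getD ""))
      (PySem.Dict.empty : PySem.Dict String String)).items

-- ===== PRECONDITION & SPEC =====
-- Pre_: every required field is present in data (Python A raises DataValidationError otherwise)
def Pre_get_required_data (required_fields : List String) (data : List (String × String)) : Prop :=
  ∀ f ∈ required_fields, (pyDictGet data f).isSome = true
instance (required_fields : List String) (data : List (String × String)) : Decidable (Pre_get_required_data required_fields data) := by unfold Pre_get_required_data; infer_instance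

def pvWitness_get_required_data : List String × (List (String × String)) :=
  (["a", "b"], [("a", "1"), ("b", "2"), ("c", "3")])

def Spec_get_required_data (required_fields : List String) (data : List (String × String)) (out : List (String × String)) : Prop := out = get_required_data_alt required_fields data
instance (required_fields : List String) (data : List (String × String)) (out : List (String × String)) : Decidable (Spec_get_required_data required_fields data out) := by unfold Spec_get_required_data; infer_instance

-- ===== CLAIM (what is proved, stated in full; the proofs are below) =====
def Claim_equal_get_required_data : Prop := ∀ (required_fields : List String) (data : List (String × String)), Dom_get_required_data required_fields data → Pre_get_required_data required_fields data → Spec_get_required_data required_fields data (get_required_data required_fields data)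

-- ===== LEMMAS AND PROOFS =====

-- once the raise has fired, A's loop state stays none
theorem foldl_getReqStep_none (data : List (String × String)) (fs : List String) :
    fs.foldl (getReqStep data) none = none := by
  induction fs with
  | nil => rfl
  | cons f fs ih => simpa [getReqStep] using ih

-- A's one fused loop, from any accumulator, equals B's two phases
theorem foldl_getReqStep_eq (data : List (String × String)) (fs : List String)
    (d : PySem.Dict String String) :
    fs.foldl (getReqStep data) (some d) =
      match fs.find? (fun f => (pyDictGet data f).isNone) with
      | some _ => none
      | none => some (fs.foldl (fun d f => d.insert f ((pyDictGet data f).getD "")) d) := by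
  induction fs generalizing d with
  | nil => rfl
  | cons f fs ih =>
    cases hv : pyDictGet data f with
    | none => simp [getReqStep, List.find?, hv, foldl_getReqStep_none]
    | some v => simp [getReqStep, List.find?, hv, ih]

-- ===== VERDICT (by name: the statement is the Claim_ definition above) =====
theorem get_required_data_spec : Claim_equal_get_required_data := by
  intro required_fields data _ _
  unfold Spec_get_required_data get_required_data get_required_data_alt
  rw [foldl_getReqStep_eq]
  cases h : required_fields.find? (fun f => (pyDictGet data f).isNone) <;> simp
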